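-- pv_equiv track=rewrite | github.com/marcwie/advent-of-code-2024 | day08.py | find_diagonal
-- ===== SOURCE A (Python) =====
-- def find_diagonal(positions, n_rows, n_cols):
--
--     antinodes = set()
--
--     for i, (xi, yi) in enumerate(positions):
--         for xj, yj in positions[i + 1 :]:
--             dx, dy = xj - xi, yj - yi
--
--             x, y = xj, yj
--             while 0 <= x < n_rows and 0 <= y < n_cols:
--                 antinodes.add((x, y))
--                 x, y = x + dx, y + dy
--
--             x, y = xj, yj
--             while 0 <= x < n_rows and 0 <= y < n_cols:
--                 antinodes.add((x, y))
--                 x, y = x - dx, y - dy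
--
--     return antinodes
-- ===== SOURCE B (Python) =====
-- def _k_bounds(b, s, n):
--     # interval of integers k with 0 <= b + k*s < n, for s != 0
--     if s > 0:
--         return -(b // s), (n - 1 - b) // s
--     return -((b + 1 - n) // s), (-b) // s
--
--
-- def find_diagonal(positions, n_rows, n_cols):
--     antinodes = set()
--
--     for i, (xi, yi) in enumerate(positions):
--         for xj, yj in positions[i + 1 :]:
--             if not (0 <= xj < n_rows and 0 <= yj < n_cols):
--                 continue
--             dx, dy = xj - xi, yj - yi
--             if dx == 0 and dy == 0:
--                 antinodes.add((xj, yj))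
--                 continue
--             if dx == 0:
--                 klo, khi = _k_bounds(yj, dy, n_cols)
--             elif dy == 0:
--                 klo, khi = _k_bounds(xj, dx, n_rows)
--             else:
--                 lx, hx = _k_bounds(xj, dx, n_rows)
--                 ly, hy = _k_bounds(yj, dy, n_cols)
--                 klo, khi = max(lx, ly), min(hx, hy)
--             for k in range(khi + 1):
--                 antinodes.add((xj + k * dx, yj + k * dy))
--             for k in range(1, -klo + 1):
--                 antinodes.add((xj - k * dx, yj - k * dy))
--
--     return antinodes
-- ===== Notes on version B (the rewrite author's own statement) =====
-- stated objective: alternative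
-- what changed: Per antenna pair, B replaces A's two outward while-scans (one bounds test per visited cell, stepping until it leaves the grid) with a closed-form floor-division computation of the admissible integer k-interval of points base+k*delta, followed by bounded range sweeps over that interval; Pre_ excludes inputs with a duplicated in-bounds antenna, on which A's while loop steps by (0,0) and never terminates.
import Mathlib
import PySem

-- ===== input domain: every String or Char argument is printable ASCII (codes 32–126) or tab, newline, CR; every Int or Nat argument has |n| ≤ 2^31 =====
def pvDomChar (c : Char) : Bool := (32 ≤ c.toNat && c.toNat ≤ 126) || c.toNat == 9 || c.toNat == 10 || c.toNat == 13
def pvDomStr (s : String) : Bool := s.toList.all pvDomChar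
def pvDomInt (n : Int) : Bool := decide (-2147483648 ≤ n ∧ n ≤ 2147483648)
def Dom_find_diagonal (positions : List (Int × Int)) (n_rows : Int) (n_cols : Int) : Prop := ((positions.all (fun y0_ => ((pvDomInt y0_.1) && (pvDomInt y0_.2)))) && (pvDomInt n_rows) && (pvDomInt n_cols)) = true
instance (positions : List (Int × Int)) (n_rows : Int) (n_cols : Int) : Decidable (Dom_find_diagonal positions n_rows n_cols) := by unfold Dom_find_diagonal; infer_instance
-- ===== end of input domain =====

-- B replaces A's two outward while-scans (bounds test per cell) by a closed-form
-- floor-division computation of the admissible k-interval per pair followed by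
-- bounded range sweeps: an alternative decomposition, similar cost.

-- ===== PORT A =====
-- 'while 0 <= x < n_rows and 0 <= y < n_cols: add; step' — fueled loop; the fuel
-- rows.toNat + cols.toNat + 1 is proved sufficient on Pre_ (it only makes the loop total).
def pvLoopA (rows cols dx dy : Int) : Nat → Int → Int → PySem.Set (Int × Int) → PySem.Set (Int × Int)
  | 0, _, _, s => s
  | fuel + 1, x, y, s =>
    if 0 ≤ x ∧ x < rows ∧ 0 ≤ y ∧ y < cols then
      pvLoopA rows cols dx dy fuel (x + dx) (y + dy) (PySem.Set.add s (x, y))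
    else s

-- body of the inner 'for xj, yj in positions[i + 1:]' loop: the two while loops
def pvPairA (rows cols : Int) (p q : Int × Int) (s : PySem.Set (Int × Int)) : PySem.Set (Int × Int) :=
  let dx := q.1 - p.1
  let dy := q.2 - p.2
  let fuel := rows.toNat + cols.toNat + 1
  let s1 := pvLoopA rows cols dx dy fuel q.1 q.2 s
  pvLoopA rows cols (-dx) (-dy) fuel q.1 q.2 s1

-- 'for i, (xi, yi) in enumerate(positions): for (xj, yj) in positions[i+1:]'
def pvOuterA (rows cols : Int) : List (Int × Int) → PySem.Set (Int × Int) → PySem.Set (Int × Int)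
  | [], s => s
  | p :: rest, s => pvOuterA rows cols rest (rest.foldl (fun s q => pvPairA rows cols p q s) s)

def find_diagonal (positions : List (Int × Int)) (n_rows : Int) (n_cols : Int) : List (Int × Int) :=
  pvOuterA n_rows n_cols positions PySem.Set.empty

-- ===== PORT B =====
-- _k_bounds(b, s, n): interval of k with 0 <= b + k*s < n, for s != 0
def pvKBounds (b s n : Int) : Int × Int :=
  if 0 < s then (-(PySem.Int.floordiv b s), PySem.Int.floordiv (n - 1 - b) s)
  else (-(PySem.Int.floordiv (b + 1 - n) s), PySem.Int.floordiv (-b) s)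

def pvPairB (rows cols : Int) (p q : Int × Int) (s : PySem.Set (Int × Int)) : PySem.Set (Int × Int) :=
  if 0 ≤ q.1 ∧ q.1 < rows ∧ 0 ≤ q.2 ∧ q.2 < cols then
    let dx := q.1 - p.1
    let dy := q.2 - p.2
    if dx = 0 ∧ dy = 0 then PySem.Set.add s q
    else
      let kb :=
        if dx = 0 then pvKBounds q.2 dy cols
        else if dy = 0 then pvKBounds q.1 dx rows
        else (max (pvKBounds q.1 dx rows).1 (pvKBounds q.2 dy cols).1,
              min (pvKBounds q.1 dx rows).2 (pvKBounds q.2 dy cols).2)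
      let s1 := (PySem.List.pyRange 0 (kb.2 + 1) 1).foldl
        (fun s k => PySem.Set.add s (q.1 + k * dx, q.2 + k * dy)) s
      (PySem.List.pyRange 1 (-kb.1 + 1) 1).foldl
        (fun s k => PySem.Set.add s (q.1 - k * dx, q.2 - k * dy)) s1
  else s

def pvOuterB (rows cols : Int) : List (Int × Int) → PySem.Set (Int × Int) → PySem.Set (Int × Int)
  | [], s => s
  | p :: rest, s => pvOuterB rows cols rest (rest.foldl (fun s q => pvPairB rows cols p q s) s)

def find_diagonal_alt (positions : List (Int × Int)) (n_rows : Int) (n_cols : Int) : List (Int × Int) :=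
  pvOuterB n_rows n_cols positions PySem.Set.empty

-- ===== PRECONDITION & SPEC =====
-- Pre_ excludes exactly the inputs where two equal antenna positions lie inside the
-- grid: there A's while loop steps by (0, 0) and never terminates (A does not return).
def Pre_find_diagonal (positions : List (Int × Int)) (n_rows : Int) (n_cols : Int) : Prop :=
  (positions.filter
    (fun p => decide (0 ≤ p.1 ∧ p.1 < n_rows ∧ 0 ≤ p.2 ∧ p.2 < n_cols))).Nodup

instance (positions : List (Int × Int)) (n_rows : Int) (n_cols : Int) : Decidable (Pre_find_diagonal positions n_rows n_cols) := by unfold Pre_find_diagonal; infer_instance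

def pvWitness_find_diagonal : (List (Int × Int)) × Int × Int := ([(0, 0), (1, 2), (2, 1)], 4, 4)

def Spec_find_diagonal (positions : List (Int × Int)) (n_rows : Int) (n_cols : Int) (out : List (Int × Int)) : Prop := out = find_diagonal_alt positions n_rows n_cols
instance (positions : List (Int × Int)) (n_rows : Int) (n_cols : Int) (out : List (Int × Int)) : Decidable (Spec_find_diagonal positions n_rows n_cols out) := by unfold Spec_find_diagonal; infer_instance

-- ===== CLAIM (what is proved, stated in full; the proofs are below) =====
def Claim_equal_find_diagonal : Prop := ∀ (positions : List (Int × Int)) (n_rows : Int) (n_cols : Int), Dom_find_diagonal positions n_rows n_cols → Pre_find_diagonal positions n_rows n_cols → Spec_find_diagonal positions n_rows n_cols (find_diagonal positions n_rows n_cols)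

-- ===== LEMMAS AND PROOFS =====

-- the fueled while loop collects exactly the first N multiples of the step, where N
-- is the first out-of-bounds index, provided the fuel covers it
theorem pvLoopA_eq_fold (rows cols dx dy : Int) (N : Nat) :
    ∀ (fuel : Nat) (x y : Int) (s : PySem.Set (Int × Int)), N ≤ fuel →
    (∀ k : Nat, k < N →
      (0 ≤ x + k * dx ∧ x + k * dx < rows ∧ 0 ≤ y + k * dy ∧ y + k * dy < cols)) →
    ¬(0 ≤ x + N * dx ∧ x + N * dx < rows ∧ 0 ≤ y + N * dy ∧ y + N * dy < cols) →
    pvLoopA rows cols dx dy fuel x y s =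
      ((List.range N).map (fun k : Nat => ((x + k * dx, y + k * dy) : Int × Int))).foldl
        PySem.Set.add s := by
  induction N with
  | zero =>
    intro fuel x y s _ _ hout
    simp only [Nat.cast_zero, zero_mul, add_zero] at hout
    cases fuel with
    | zero => simp [pvLoopA]
    | succ m => simp [pvLoopA, if_neg hout]
  | succ n ih =>
    intro fuel x y s hfuel hin hout
    cases fuel with
    | zero => omega
    | succ m =>
      have h0 := hin 0 (Nat.succ_pos n)
      simp only [Nat.cast_zero, zero_mul, add_zero] at h0
      simp only [pvLoopA, if_pos h0]
      rw [ih m (x + dx) (y + dy) (PySem.Set.add s (x, y)) (by omega)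
        (by
          intro k hk
          have hh := hin (k + 1) (by omega)
          push_cast at hh
          have e1 : x + ((k : Int) + 1) * dx = x + dx + (k : Int) * dx := by ring
          have e2 : y + ((k : Int) + 1) * dy = y + dy + (k : Int) * dy := by ring
          rw [e1, e2] at hh
          exact hh)
        (by
          intro hc
          apply hout
          push_cast
          have e1 : x + ((n : Int) + 1) * dx = x + dx + (n : Int) * dx := by ring
          have e2 : y + ((n : Int) + 1) * dy = y + dy + (n : Int) * dy := by ring
          rw [e1, e2]
          exact hc)]
      rw [List.range_succ_eq_map]
      simp only [List.map_cons, List.map_map, List.foldl_cons, Nat.cast_zero, zero_mul,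
        add_zero]
      congr 1
      apply List.map_congr_left
      intro k _
      simp only [Function.comp_apply, Nat.succ_eq_add_one, Prod.mk.injEq]
      constructor <;> push_cast <;> ring

-- per-axis interval characterisation of _k_bounds
theorem pvKBounds_iff (b s n k : Int) (hs : s ≠ 0) :
    (0 ≤ b + k * s ∧ b + k * s < n) ↔
      ((pvKBounds b s n).1 ≤ k ∧ k ≤ (pvKBounds b s n).2) := by
  rcases lt_or_gt_of_ne hs with hneg | hpos
  · -- s < 0
    have hps : (0 : Int) < -s := by omega
    have e1 := PySem.Int.floordiv_neg_neg (n - 1 - b) (-s)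
    rw [neg_neg] at e1
    have e2 := PySem.Int.floordiv_neg_neg b (-s)
    rw [neg_neg] at e2
    simp only [pvKBounds, if_neg (by omega : ¬ (0 : Int) < s),
      show b + 1 - n = -(n - 1 - b) by ring, e1, e2]
    constructor
    · rintro ⟨h3, h4⟩
      refine ⟨?_, ?_⟩
      · rw [neg_le, PySem.Int.le_floordiv_iff_mul_le hps, neg_mul_neg]
        linarith
      · rw [PySem.Int.le_floordiv_iff_mul_le hps, mul_neg]
        linarith
    · rintro ⟨hlo, hhi⟩
      rw [neg_le, PySem.Int.le_floordiv_iff_mul_le hps, neg_mul_neg] at hlo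
      rw [PySem.Int.le_floordiv_iff_mul_le hps, mul_neg] at hhi
      constructor <;> linarith
  · -- s > 0
    simp only [pvKBounds, if_pos hpos]
    constructor
    · rintro ⟨h3, h4⟩
      refine ⟨?_, ?_⟩
      · rw [neg_le, PySem.Int.le_floordiv_iff_mul_le hpos, neg_mul]
        linarith
      · rw [PySem.Int.le_floordiv_iff_mul_le hpos]
        linarith
    · rintro ⟨hlo, hhi⟩
      rw [neg_le, PySem.Int.le_floordiv_iff_mul_le hpos, neg_mul] at hlo
      rw [PySem.Int.le_floordiv_iff_mul_le hpos] at hhi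
      constructor <;> linarith

-- size bound on any admissible k along a nonzero axis
theorem pvK_abs_bound (b s n k : Int) (hs : s ≠ 0) (h1 : 0 ≤ b) (h2 : b < n)
    (h3 : 0 ≤ b + k * s) (h4 : b + k * s < n) : -(n - 1) ≤ k ∧ k ≤ n - 1 := by
  rcases lt_or_gt_of_ne hs with hneg | hpos
  · by_cases hk : 0 ≤ k
    · have hm : k * 1 ≤ k * (-s) := by
        apply mul_le_mul_of_nonneg_left (by omega) hk
      constructor <;> nlinarith
    · have hm : (-k) * 1 ≤ (-k) * (-s) := by
        apply mul_le_mul_of_nonneg_left (by omega) (by omega)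
      constructor <;> nlinarith
  · by_cases hk : 0 ≤ k
    · have hm : k * 1 ≤ k * s := by
        apply mul_le_mul_of_nonneg_left (by omega) hk
      constructor <;> nlinarith
    · have hm : (-k) * 1 ≤ (-k) * s := by
        apply mul_le_mul_of_nonneg_left (by omega) (by omega)
      constructor <;> nlinarith

-- bounds on the interval endpoints, needed to discharge the fuel
theorem pvBounds_of_iff (rows cols dx dy : Int) (q : Int × Int) (klo khi : Int)
    (hq : 0 ≤ q.1 ∧ q.1 < rows ∧ 0 ≤ q.2 ∧ q.2 < cols) (hd : ¬(dx = 0 ∧ dy = 0))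
    (hiff : ∀ k : Int,
      (0 ≤ q.1 + k * dx ∧ q.1 + k * dx < rows ∧ 0 ≤ q.2 + k * dy ∧ q.2 + k * dy < cols) ↔
        (klo ≤ k ∧ k ≤ khi)) :
    khi ≤ rows + cols ∧ -(rows + cols) ≤ klo := by
  have h0 : klo ≤ 0 ∧ 0 ≤ khi := (hiff 0).mp (by simpa using hq)
  have hhi := (hiff khi).mpr ⟨by omega, le_refl _⟩
  have hlo := (hiff klo).mpr ⟨le_refl _, by omega⟩
  by_cases hx : dx = 0
  · have hy : dy ≠ 0 := fun h2 => hd ⟨hx, h2⟩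
    have b1 := pvK_abs_bound q.2 dy cols khi hy hq.2.2.1 hq.2.2.2 hhi.2.2.1 hhi.2.2.2
    have b2 := pvK_abs_bound q.2 dy cols klo hy hq.2.2.1 hq.2.2.2 hlo.2.2.1 hlo.2.2.2
    omega
  · have b1 := pvK_abs_bound q.1 dx rows khi hx hq.1 hq.2.1 hhi.1 hhi.2.1
    have b2 := pvK_abs_bound q.1 dx rows klo hx hq.1 hq.2.1 hlo.1 hlo.2.1
    omega

-- the two while loops of A equal B's two bounded sweeps, given the k-interval
theorem pvPair_core (rows cols dx dy : Int) (q : Int × Int) (klo khi : Int)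
    (hq : 0 ≤ q.1 ∧ q.1 < rows ∧ 0 ≤ q.2 ∧ q.2 < cols)
    (hiff : ∀ k : Int,
      (0 ≤ q.1 + k * dx ∧ q.1 + k * dx < rows ∧ 0 ≤ q.2 + k * dy ∧ q.2 + k * dy < cols) ↔
        (klo ≤ k ∧ k ≤ khi))
    (hbk : khi ≤ rows + cols) (hbl : -(rows + cols) ≤ klo)
    (s : PySem.Set (Int × Int)) :
    pvLoopA rows cols (-dx) (-dy) (rows.toNat + cols.toNat + 1) q.1 q.2
      (pvLoopA rows cols dx dy (rows.toNat + cols.toNat + 1) q.1 q.2 s)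
    = (PySem.List.pyRange 1 (-klo + 1) 1).foldl
        (fun s k => PySem.Set.add s (q.1 - k * dx, q.2 - k * dy))
        ((PySem.List.pyRange 0 (khi + 1) 1).foldl
          (fun s k => PySem.Set.add s (q.1 + k * dx, q.2 + k * dy)) s) := by
  have h0 : klo ≤ 0 ∧ 0 ≤ khi := (hiff 0).mp (by simpa using hq)
  have hB : pvLoopA rows cols (-dx) (-dy) (rows.toNat + cols.toNat + 1) q.1 q.2
      (pvLoopA rows cols dx dy (rows.toNat + cols.toNat + 1) q.1 q.2 s) =
      ((List.range (1 - klo).toNat).map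
        (fun k : Nat => ((q.1 + k * (-dx), q.2 + k * (-dy)) : Int × Int))).foldl
        PySem.Set.add
        (pvLoopA rows cols dx dy (rows.toNat + cols.toNat + 1) q.1 q.2 s) := by
    apply pvLoopA_eq_fold
    · omega
    · intro k hk
      have hh := (hiff (-(k : Int))).mpr (by constructor <;> omega)
      simp only [neg_mul] at hh
      simpa only [mul_neg] using hh
    · intro hc
      simp only [mul_neg] at hc
      have := (hiff (-(((1 - klo).toNat : Nat) : Int))).mp (by simpa only [neg_mul] using hc)
      omega
  have hF : pvLoopA rows cols dx dy (rows.toNat + cols.toNat + 1) q.1 q.2 s =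
      ((List.range (khi + 1).toNat).map
        (fun k : Nat => ((q.1 + k * dx, q.2 + k * dy) : Int × Int))).foldl
        PySem.Set.add s := by
    apply pvLoopA_eq_fold
    · omega
    · intro k hk
      exact (hiff k).mpr (by constructor <;> omega)
    · intro hc
      have := (hiff (((khi + 1).toNat : Nat) : Int)).mp hc
      omega
  rw [hB, hF]
  rw [PySem.List.pyRange_one 1 (-klo + 1), PySem.List.pyRange_one 0 (khi + 1)]
  simp only [List.foldl_map, sub_zero, zero_add, add_sub_cancel_right]
  have hmem : ((q.1, q.2) : Int × Int) ∈
      (List.range (khi + 1).toNat).foldl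
        (fun s (k : Nat) => PySem.Set.add s (q.1 + (k : Int) * dx, q.2 + (k : Int) * dy)) s := by
    rw [PySem.Set.mem_foldl_add]
    exact Or.inr ⟨0, List.mem_range.mpr (by omega), by simp⟩
  rw [show (1 - klo).toNat = (-klo).toNat + 1 by omega, List.range_succ_eq_map,
    List.foldl_cons, List.foldl_map]
  simp only [Nat.cast_zero, zero_mul, add_zero]
  rw [PySem.Set.add_of_mem hmem]
  apply PySem.List.foldl_congr_mem
  intro acc j _
  congr 1
  simp only [Prod.mk.injEq, Nat.succ_eq_add_one]
  constructor <;> push_cast <;> ring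

-- the heart: on a pair the two bodies agree, given that an in-bounds base with a
-- zero step (i.e. a duplicated in-bounds antenna) cannot occur
theorem pvPair_eq (rows cols : Int) (p q : Int × Int)
    (h : ¬(q = p ∧ (0 ≤ q.1 ∧ q.1 < rows ∧ 0 ≤ q.2 ∧ q.2 < cols)))
    (s : PySem.Set (Int × Int)) :
    pvPairA rows cols p q s = pvPairB rows cols p q s := by
  by_cases hq : 0 ≤ q.1 ∧ q.1 < rows ∧ 0 ≤ q.2 ∧ q.2 < cols
  · have hpq : q ≠ p := fun hqp => h ⟨hqp, hq⟩
    have hd : ¬(q.1 - p.1 = 0 ∧ q.2 - p.2 = 0) := by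
      rintro ⟨h1, h2⟩
      exact hpq (Prod.ext_iff.mpr ⟨by omega, by omega⟩)
    simp only [pvPairA, pvPairB, if_pos hq, if_neg hd]
    by_cases hx : q.1 - p.1 = 0
    · have hy : q.2 - p.2 ≠ 0 := fun h2 => hd ⟨hx, h2⟩
      rw [if_pos hx]
      have hiff : ∀ k : Int,
          (0 ≤ q.1 + k * (q.1 - p.1) ∧ q.1 + k * (q.1 - p.1) < rows ∧
            0 ≤ q.2 + k * (q.2 - p.2) ∧ q.2 + k * (q.2 - p.2) < cols) ↔
          ((pvKBounds q.2 (q.2 - p.2) cols).1 ≤ k ∧ k ≤ (pvKBounds q.2 (q.2 - p.2) cols).2) := by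
        intro k
        have ha := pvKBounds_iff q.2 (q.2 - p.2) cols k hy
        rw [hx]
        simp only [mul_zero, add_zero]
        constructor
        · rintro ⟨_, _, h3, h4⟩
          exact ha.mp ⟨h3, h4⟩
        · intro hb
          exact ⟨hq.1, hq.2.1, (ha.mpr hb).1, (ha.mpr hb).2⟩
      have hbd := pvBounds_of_iff rows cols (q.1 - p.1) (q.2 - p.2) q _ _ hq hd hiff
      exact pvPair_core rows cols (q.1 - p.1) (q.2 - p.2) q _ _ hq hiff hbd.1 hbd.2 s
    · rw [if_neg hx]
      by_cases hy : q.2 - p.2 = 0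
      · rw [if_pos hy]
        have hiff : ∀ k : Int,
            (0 ≤ q.1 + k * (q.1 - p.1) ∧ q.1 + k * (q.1 - p.1) < rows ∧
              0 ≤ q.2 + k * (q.2 - p.2) ∧ q.2 + k * (q.2 - p.2) < cols) ↔
            ((pvKBounds q.1 (q.1 - p.1) rows).1 ≤ k ∧
              k ≤ (pvKBounds q.1 (q.1 - p.1) rows).2) := by
          intro k
          have ha := pvKBounds_iff q.1 (q.1 - p.1) rows k hx
          rw [hy]
          simp only [mul_zero, add_zero]
          constructor
          · rintro ⟨h1, h2, _, _⟩
            exact ha.mp ⟨h1, h2⟩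
          · intro hb
            exact ⟨(ha.mpr hb).1, (ha.mpr hb).2, hq.2.2.1, hq.2.2.2⟩
        have hbd := pvBounds_of_iff rows cols (q.1 - p.1) (q.2 - p.2) q _ _ hq hd hiff
        exact pvPair_core rows cols (q.1 - p.1) (q.2 - p.2) q _ _ hq hiff hbd.1 hbd.2 s
      · rw [if_neg hy]
        have hiff : ∀ k : Int,
            (0 ≤ q.1 + k * (q.1 - p.1) ∧ q.1 + k * (q.1 - p.1) < rows ∧
              0 ≤ q.2 + k * (q.2 - p.2) ∧ q.2 + k * (q.2 - p.2) < cols) ↔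
            (max (pvKBounds q.1 (q.1 - p.1) rows).1 (pvKBounds q.2 (q.2 - p.2) cols).1 ≤ k ∧
              k ≤ min (pvKBounds q.1 (q.1 - p.1) rows).2 (pvKBounds q.2 (q.2 - p.2) cols).2) := by
          intro k
          have ha := pvKBounds_iff q.1 (q.1 - p.1) rows k hx
          have hb := pvKBounds_iff q.2 (q.2 - p.2) cols k hy
          constructor
          · rintro ⟨h1, h2, h3, h4⟩
            have c1 := ha.mp ⟨h1, h2⟩
            have c2 := hb.mp ⟨h3, h4⟩
            exact ⟨max_le c1.1 c2.1, le_min c1.2 c2.2⟩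
          · rintro ⟨hlo, hhi⟩
            rw [max_le_iff] at hlo
            rw [le_min_iff] at hhi
            have c1 := ha.mpr ⟨hlo.1, hhi.1⟩
            have c2 := hb.mpr ⟨hlo.2, hhi.2⟩
            exact ⟨c1.1, c1.2, c2.1, c2.2⟩
        have hbd := pvBounds_of_iff rows cols (q.1 - p.1) (q.2 - p.2) q _ _ hq hd hiff
        exact pvPair_core rows cols (q.1 - p.1) (q.2 - p.2) q _ _ hq hiff hbd.1 hbd.2 s
  · simp only [pvPairA, pvPairB, if_neg hq]
    have hstop : ∀ (dx dy : Int) (s' : PySem.Set (Int × Int)),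
        pvLoopA rows cols dx dy (rows.toNat + cols.toNat + 1) q.1 q.2 s' = s' := by
      intro dx dy s'
      simp [pvLoopA, if_neg hq]
    rw [hstop, hstop]

theorem pvInner_eq (rows cols : Int) (p : Int × Int) :
    ∀ (rest : List (Int × Int)) (s : PySem.Set (Int × Int)),
    (∀ q ∈ rest, ¬(q = p ∧ (0 ≤ q.1 ∧ q.1 < rows ∧ 0 ≤ q.2 ∧ q.2 < cols))) →
    rest.foldl (fun s q => pvPairA rows cols p q s) s =
      rest.foldl (fun s q => pvPairB rows cols p q s) s := by
  intro rest
  induction rest with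
  | nil => intro s _; rfl
  | cons q rest ih =>
    intro s hq
    simp only [List.foldl_cons]
    rw [pvPair_eq rows cols p q (hq q (by simp)) s]
    exact ih _ (fun r hr => hq r (by simp [hr]))

theorem pvOuter_eq (rows cols : Int) :
    ∀ (l : List (Int × Int)) (s : PySem.Set (Int × Int)),
    (l.filter (fun p => decide (0 ≤ p.1 ∧ p.1 < rows ∧ 0 ≤ p.2 ∧ p.2 < cols))).Nodup →
    pvOuterA rows cols l s = pvOuterB rows cols l s := by
  intro l
  induction l with
  | nil => intro s _; rfl
  | cons p rest ih =>
    intro s hnd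
    rw [List.filter_cons] at hnd
    have hrest : (rest.filter
        (fun p => decide (0 ≤ p.1 ∧ p.1 < rows ∧ 0 ≤ p.2 ∧ p.2 < cols))).Nodup := by
      split at hnd
      · exact (List.nodup_cons.mp hnd).2
      · exact hnd
    have hmem : ∀ q ∈ rest, ¬(q = p ∧ (0 ≤ q.1 ∧ q.1 < rows ∧ 0 ≤ q.2 ∧ q.2 < cols)) := by
      rintro q hqmem ⟨hqp, hin⟩
      subst hqp
      split at hnd
      · exact (List.nodup_cons.mp hnd).1
          (List.mem_filter.mpr ⟨hqmem, by simpa using hin⟩)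
      · next hfalse => exact hfalse (by simpa using hin)
    simp only [pvOuterA, pvOuterB]
    rw [pvInner_eq rows cols p rest s hmem]
    exact ih _ hrest

-- ===== VERDICT (by name: the statement is the Claim_ definition above) =====
theorem find_diagonal_spec : Claim_equal_find_diagonal := by
  intro positions n_rows n_cols _ hpre
  unfold Spec_find_diagonal find_diagonal find_diagonal_alt
  exact pvOuter_eq n_rows n_cols positions PySem.Set.empty hpre
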